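-- pv_equiv track=rewrite | github.com/ismailaricioglu/advent-of-code-2025 | day5/ismailaricioglu_part1.py | split_ranges_and_ids
-- ===== SOURCE A (Python) =====
-- def split_ranges_and_ids(text: str):
--     """
--     Verilen çok satırlı metni iki bölüme ayırır: Üst kısımda aralık (range) değerleri,
--     boş satırdan sonraki kısımda ise tam sayı ID'ler bulunur. Bu fonksiyon, boş satırı
--     bir ayraç olarak kullanarak önce aralıkları toplar, ardından ID listesini üretir.
--     """
--     ranges = []
--     ids = []
--     lines = text.splitlines()
--
--     blank_found = False
--     for line in lines:
--         stripped = line.strip()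
--         if stripped == "":
--             blank_found = True
--             continue
--         if not blank_found:
--             ranges.append(stripped)
--         else:
--             ids.append(int(stripped))  # Sayıları int olarak alıyoruz
--
--     return ranges, ids
-- ===== SOURCE B (Python) =====
-- def split_ranges_and_ids(text: str):
--     lines = text.splitlines()
--     # locate the first blank (whitespace-only) line; len(lines) if none
--     sep = len(lines)
--     for i, line in enumerate(lines):
--         if line.strip() == "":
--             sep = i
--             break
--     top = lines[:sep]
--     bottom = lines[sep + 1:]
--     ranges = [l.strip() for l in top]
--     ids = [int(l.strip()) for l in bottom if l.strip() != ""]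
--     return ranges, ids
-- ===== Notes on version B (the rewrite author's own statement) =====
-- stated objective: alternative
-- what changed: Replaces the stateful single pass with a blank_found flag by a locate-then-slice decomposition: find the first blank line's index, slice top/bottom, and build ranges and ids with two comprehensions.
import Mathlib
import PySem

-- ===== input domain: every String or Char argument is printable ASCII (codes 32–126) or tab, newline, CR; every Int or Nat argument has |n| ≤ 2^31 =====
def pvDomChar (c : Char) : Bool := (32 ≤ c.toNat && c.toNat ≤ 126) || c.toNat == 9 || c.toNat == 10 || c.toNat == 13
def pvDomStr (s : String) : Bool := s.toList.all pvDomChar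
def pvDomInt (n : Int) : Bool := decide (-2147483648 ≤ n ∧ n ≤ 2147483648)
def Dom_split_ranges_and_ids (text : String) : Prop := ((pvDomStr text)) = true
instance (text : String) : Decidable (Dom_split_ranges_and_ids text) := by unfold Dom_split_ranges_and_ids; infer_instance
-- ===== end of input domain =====

-- B replaces A's stateful single pass (blank_found flag) by locating the first blank line,
-- slicing top/bottom, and building the two lists with two comprehensions (objective: alternative).


-- ===== PORT A =====
-- int(s); Pre_ guarantees the parse succeeds, so the .getD 0 default is never reached
def pvParse (s : String) : Int := (PySem.Int.ofStr? s).getD 0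

def goA : List String → List String → List Int → Bool → List String × List Int
  | [], ranges, ids, _ => (ranges, ids)
  | line :: rest, ranges, ids, blank_found =>
    let stripped := PySem.Str.strip line
    if stripped = "" then goA rest ranges ids true
    else if !blank_found then goA rest (ranges ++ [stripped]) ids blank_found
    else goA rest ranges (ids ++ [pvParse stripped]) blank_found

def split_ranges_and_ids (text : String) : List String × List Int :=
  goA (PySem.Str.splitlines text) [] [] false

-- ===== PORT B =====
-- index of the first whitespace-only line, length if none (B's enumerate/break loop)
def firstBlank : List String → Nat
  | [] => 0
  | line :: rest => if PySem.Str.strip line = "" then 0 else firstBlank rest + 1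

def split_ranges_and_ids_alt (text : String) : List String × List Int :=
  let lines := PySem.Str.splitlines text
  let sep := firstBlank lines
  let top := lines.take sep
  let bottom := lines.drop (sep + 1)
  (top.map (fun l => PySem.Str.strip l),
   (bottom.filter (fun l => PySem.Str.strip l ≠ "")).map (fun l => pvParse (PySem.Str.strip l)))

-- ===== PRECONDITION & SPEC =====
-- Pre_ excludes exactly the inputs where Python's int() raises ValueError (both A and B raise
-- there): a non-blank line after the first blank line whose stripped text is not int-parseable.
def Pre_split_ranges_and_ids (text : String) : Prop :=
  ∀ l ∈ (PySem.Str.splitlines text).drop (firstBlank (PySem.Str.splitlines text) + 1),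
    PySem.Str.strip l ≠ "" → (PySem.Int.ofStr? (PySem.Str.strip l)).isSome = true
instance (text : String) : Decidable (Pre_split_ranges_and_ids text) := by unfold Pre_split_ranges_and_ids; infer_instance
def pvWitness_split_ranges_and_ids : String := "1-3\n5-7\n\n 4\n9"

def Spec_split_ranges_and_ids (text : String) (out : List String × List Int) : Prop := out = split_ranges_and_ids_alt text
instance (text : String) (out : List String × List Int) : Decidable (Spec_split_ranges_and_ids text out) := by unfold Spec_split_ranges_and_ids; infer_instance

-- ===== CLAIM (what is proved, stated in full; the proofs are below) =====
def Claim_equal_split_ranges_and_ids : Prop := ∀ (text : String), Dom_split_ranges_and_ids text → Pre_split_ranges_and_ids text → Spec_split_ranges_and_ids text (split_ranges_and_ids text)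

-- ===== LEMMAS AND PROOFS =====

-- after the blank line A just collects the parses of the non-blank lines
theorem goA_true (lines : List String) (ranges : List String) (ids : List Int) :
    goA lines ranges ids true =
      (ranges, ids ++ (lines.filter (fun l => PySem.Str.strip l ≠ "")).map (fun l => pvParse (PySem.Str.strip l))) := by
  induction lines generalizing ids with
  | nil => simp [goA]
  | cons l t ih =>
    by_cases h : PySem.Str.strip l = "" <;> simp [goA, h, ih]

-- before the blank line A collects stripped lines into ranges; firstBlank marks the switch
theorem goA_false (lines : List String) (ranges : List String) (ids : List Int) :
    goA lines ranges ids false =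
      (ranges ++ (lines.take (firstBlank lines)).map (fun l => PySem.Str.strip l),
       ids ++ ((lines.drop (firstBlank lines + 1)).filter (fun l => PySem.Str.strip l ≠ "")).map (fun l => pvParse (PySem.Str.strip l))) := by
  induction lines generalizing ranges with
  | nil => simp [goA, firstBlank]
  | cons l t ih =>
    by_cases h : PySem.Str.strip l = ""
    · simp [goA, h, firstBlank, goA_true]
    · simp [goA, h, firstBlank, ih, List.take_succ_cons]

-- ===== VERDICT (by name: the statement is the Claim_ definition above) =====
theorem split_ranges_and_ids_spec : Claim_equal_split_ranges_and_ids := by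
  intro text _ _
  unfold Spec_split_ranges_and_ids split_ranges_and_ids split_ranges_and_ids_alt
  simp [goA_false]
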